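-- pv_equiv track=rewrite | github.com/devYuMinKim/Coding_Test_with_JavaScript | 20220720/모법답안/20220720_09.js/messenger.py | solution
-- ===== SOURCE A (Python) =====
-- def solution(message):
--     """
--     :param message: string
--     :return: int
--     """
--     answer = [1, 1]
--     prev = -1
--
--     for i in message:
--         if i == prev and (i == 'n' or i == 'u'):
--             answer.append((answer[-1] + answer[-2]))
--         else:
--             answer.append(answer[-1])
--         prev = i
--
--     return answer[-1]
-- ===== SOURCE B (Python) =====
-- def solution(message):
--     """
--     :param message: string
--     :return: int
--     """
--     result = 1
--     rest = message
--     while rest: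
--         c = rest[0]
--         k = 0
--         while k < len(rest) and rest[k] == c:
--             k += 1
--         if c == 'n' or c == 'u':
--             a, b = 1, 1
--             for _ in range(k):
--                 a, b = b, a + b
--             result *= a
--         rest = rest[k:]
--     return result
-- ===== Notes on version B (the rewrite author's own statement) =====
-- stated objective: alternative
-- what changed: Instead of growing a full list by a last-two recurrence over every character, B decomposes the string into maximal runs and multiplies Fibonacci factors: for each maximal run of 'n' or 'u' of length k it multiplies the result by F(k+1) computed with two rolling ints.
import Mathlib
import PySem

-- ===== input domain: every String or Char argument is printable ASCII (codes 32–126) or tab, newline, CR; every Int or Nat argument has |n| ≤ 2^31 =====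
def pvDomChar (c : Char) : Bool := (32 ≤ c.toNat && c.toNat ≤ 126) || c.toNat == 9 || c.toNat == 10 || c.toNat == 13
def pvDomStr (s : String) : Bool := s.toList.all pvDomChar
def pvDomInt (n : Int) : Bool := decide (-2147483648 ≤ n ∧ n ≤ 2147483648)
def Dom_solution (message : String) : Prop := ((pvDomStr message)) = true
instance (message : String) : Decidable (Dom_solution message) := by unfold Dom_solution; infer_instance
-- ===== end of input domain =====

-- B replaces A's growing answer-list recurrence with a run-length decomposition multiplying Fibonacci factors (alternative decomposition, same return value).

-- ===== PORT A =====
-- Python's `prev = -1` sentinel is `none`; `i == prev` is `st.2 = some i` (the int sentinel never equals a char).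
def stepA (st : List Int × Option Char) (i : Char) : List Int × Option Char :=
  if st.2 = some i ∧ (i = 'n' ∨ i = 'u') then
    (st.1 ++ [PySem.List.pyGetD st.1 (-1) 0 + PySem.List.pyGetD st.1 (-2) 0], some i)
  else
    (st.1 ++ [PySem.List.pyGetD st.1 (-1) 0], some i)

def solution (message : String) : Int :=
  PySem.List.pyGetD (message.toList.foldl stepA ([1, 1], none)).1 (-1) 0

-- ===== PORT B =====
-- inner `while` scan of equal chars = takeWhile/dropWhile; the Fibonacci loop is a fold over range k.
def solution_alt_go (result : Int) (l : List Char) : Int :=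
  match l with
  | [] => result
  | c :: rest0 =>
      let k : Nat := (rest0.takeWhile (fun x => x = c)).length + 1
      let result' : Int :=
        if c = 'n' ∨ c = 'u' then
          result * ((List.range k).foldl (fun p _ => (p.2, p.1 + p.2)) ((1 : Int), (1 : Int))).1
        else result
      solution_alt_go result' (rest0.dropWhile (fun x => x = c))
termination_by l.length
decreasing_by
  simp only [List.length_cons]
  exact Nat.lt_succ_of_le (List.length_dropWhile_le _ _)

def solution_alt (message : String) : Int := solution_alt_go 1 message.toList

-- ===== PRECONDITION & SPEC =====
def Spec_solution (message : String) (out : Int) : Prop := out = solution_alt message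
instance (message : String) (out : Int) : Decidable (Spec_solution message out) := by unfold Spec_solution; infer_instance

-- ===== CLAIM (what is proved, stated in full; the proofs are below) =====
def Claim_equal_solution : Prop := ∀ (message : String), Dom_solution message → Spec_solution message (solution message)

-- ===== LEMMAS AND PROOFS =====

-- abstract last-two-values view of A's loop
def specA (prev : Option Char) (a b : Int) (l : List Char) : Int :=
  match l with
  | [] => b
  | c :: cs =>
      if prev = some c ∧ (c = 'n' ∨ c = 'u') then specA (some c) b (a + b) cs
      else specA (some c) b b cs

-- Fibonacci step iterated from the front
def gfib : Nat → Int → Int → Int × Int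
  | 0, a, b => (a, b)
  | m + 1, a, b => gfib m b (a + b)

lemma foldA_spec (cs : List Char) : ∀ (l : List Int) (y x : Int) (prev : Option Char),
    PySem.List.pyGetD (List.foldl stepA (l ++ [y, x], prev) cs).1 (-1) 0 = specA prev y x cs := by
  induction cs with
  | nil =>
      intro l y x prev
      show PySem.List.pyGetD (l ++ [y, x]) (-1) 0 = specA prev y x []
      rw [show l ++ [y, x] = (l ++ [y]) ++ [x] by simp,
        PySem.List.pyGetD_neg_one_append_singleton]
      rfl
  | cons c cs ih =>
      intro l y x prev
      have h1 : PySem.List.pyGetD (l ++ [y, x]) (-1) 0 = x := by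
        have : l ++ [y, x] = (l ++ [y]) ++ [x] := by simp
        rw [this, PySem.List.pyGetD_neg_one_append_singleton]
      have h2 : PySem.List.pyGetD (l ++ [y, x]) (-2) 0 = y := by
        rw [PySem.List.pyGetD_neg_ofNat (l ++ [y, x]) 2 0 (by omega) (by simp)]
        simp [List.getElem_append_right]
      simp only [List.foldl_cons, stepA]
      by_cases hc : prev = some c ∧ (c = 'n' ∨ c = 'u')
      · rw [if_pos hc]
        have : (l ++ [y, x]) ++ [PySem.List.pyGetD (l ++ [y, x]) (-1) 0 +
            PySem.List.pyGetD (l ++ [y, x]) (-2) 0] = (l ++ [y]) ++ [x, x + y] := by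
          rw [h1, h2]; simp [Int.add_comm]
        rw [this, ih]
        simp [specA, hc, Int.add_comm]
      · rw [if_neg hc]
        have : (l ++ [y, x]) ++ [PySem.List.pyGetD (l ++ [y, x]) (-1) 0] =
            (l ++ [y]) ++ [x, x] := by rw [h1]; simp
        rw [this, ih]
        simp [specA, hc]

lemma gfib_step (m : Nat) : ∀ (a b : Int),
    ((gfib m a b).2, (gfib m a b).1 + (gfib m a b).2) = gfib m b (a + b) := by
  induction m with
  | zero => intro a b; rfl
  | succ m ih => intro a b; exact ih b (a + b)

lemma range_foldl_gfib (k : Nat) :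
    (List.range k).foldl (fun p _ => (p.2, p.1 + p.2)) ((1 : Int), (1 : Int)) = gfib k 1 1 := by
  induction k with
  | zero => rfl
  | succ k ih =>
      rw [List.range_succ, List.foldl_append, ih, List.foldl_cons, List.foldl_nil]
      exact gfib_step k 1 1

lemma gfib_shift (m : Nat) : ∀ (a b : Int), (gfib m b (a + b)).1 = (gfib m a b).2 := by
  induction m with
  | zero => intro a b; rfl
  | succ m ih =>
      intro a b
      show (gfib m (a + b) (b + (a + b))).1 = (gfib m b (a + b)).2
      exact ih b (a + b)

lemma gfib_linear (m : Nat) : ∀ (b p q : Int),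
    gfib m (b * p) (b * q) = (b * (gfib m p q).1, b * (gfib m p q).2) := by
  induction m with
  | zero => intro b p q; rfl
  | succ m ih =>
      intro b p q
      simp only [gfib]
      have : b * p + b * q = b * (p + q) := by ring
      rw [this, ih]

lemma specA_run_nu (c : Char) (hnu : c = 'n' ∨ c = 'u') (m : Nat) :
    ∀ (a b : Int) (rest : List Char),
      specA (some c) a b (List.replicate m c ++ rest) =
      specA (some c) (gfib m a b).1 (gfib m a b).2 rest := by
  induction m with
  | zero => intro a b rest; rfl
  | succ m ih =>
      intro a b rest
      simp only [List.replicate_succ, List.cons_append, specA, hnu, and_true]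
      exact ih b (a + b) rest

lemma specA_run_other (c : Char) (hnu : ¬(c = 'n' ∨ c = 'u')) (m : Nat) :
    ∀ (b : Int) (rest : List Char),
      specA (some c) b b (List.replicate m c ++ rest) = specA (some c) b b rest := by
  induction m with
  | zero => intro b rest; rfl
  | succ m ih =>
      intro b rest
      simp only [List.replicate_succ, List.cons_append, specA]
      rw [if_neg (by simp [hnu])]
      exact ih b rest

lemma head?_dropWhile_ne (c : Char) (l : List Char) :
    ∀ x, (l.dropWhile (fun y => y = c)).head? = some x → x ≠ c := by
  induction l with
  | nil => intro x h; simp at h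
  | cons a l ih =>
      intro x h
      by_cases ha : a = c
      · rw [List.dropWhile_cons_of_pos (by simp [ha])] at h; exact ih x h
      · rw [List.dropWhile_cons_of_neg (by simp [ha])] at h
        simp at h; subst h; exact ha

lemma takeWhile_eq_replicate (c : Char) (l : List Char) :
    l.takeWhile (fun y => y = c) = List.replicate (l.takeWhile (fun y => y = c)).length c := by
  apply List.eq_replicate_of_mem
  intro b hb
  have := List.mem_takeWhile_imp hb
  simpa using this

lemma go_cons (b : Int) (c : Char) (cs' : List Char) :
    solution_alt_go b (c :: cs') =
      solution_alt_go
        (if c = 'n' ∨ c = 'u' then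
          b * ((List.range ((cs'.takeWhile (fun x => x = c)).length + 1)).foldl
                 (fun p _ => (p.2, p.1 + p.2)) ((1 : Int), (1 : Int))).1
         else b)
        (cs'.dropWhile (fun x => x = c)) := by
  rw [solution_alt_go]

lemma specA_eq_go (n : Nat) : ∀ (cs : List Char), cs.length ≤ n →
    ∀ (prev : Option Char) (a b : Int),
      (∀ c, cs.head? = some c → prev ≠ some c) →
      specA prev a b cs = solution_alt_go b cs := by
  induction n with
  | zero =>
      intro cs hlen prev a b _
      have h : cs = [] := by
        cases cs with
        | nil => rfl
        | cons x xs => simp at hlen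
      subst h
      simp [specA, solution_alt_go]
  | succ n ih =>
      intro cs hlen prev a b hmis
      match cs with
      | [] => simp [specA, solution_alt_go]
      | c :: cs' =>
          have hne : ¬ prev = some c := hmis c rfl
          rw [show specA prev a b (c :: cs') = specA (some c) b b cs' by
            simp [specA, hne]]
          set m := (cs'.takeWhile (fun y => y = c)).length with hm
          have hsplit : cs' = List.replicate m c ++ cs'.dropWhile (fun y => y = c) := by
            conv_lhs => rw [← List.takeWhile_append_dropWhile (p := fun y => y = c) (l := cs')]
            rw [← takeWhile_eq_replicate]
          have hrestlen : (cs'.dropWhile (fun y => y = c)).length ≤ n := by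
            have := List.length_dropWhile_le (fun y => y = c) cs'
            simp only [List.length_cons] at hlen; omega
          have hrestmis : ∀ x, (cs'.dropWhile (fun y => y = c)).head? = some x →
              (some c : Option Char) ≠ some x := by
            intro x hx
            have := head?_dropWhile_ne c cs' x hx
            simp [Ne]; exact fun h => this h.symm
          rw [go_cons b c cs']
          by_cases hnu : c = 'n' ∨ c = 'u'
          · conv_lhs => rw [hsplit]
            rw [specA_run_nu c hnu m b b, ih _ hrestlen _ _ _ hrestmis]
            simp only [hnu, if_pos]
            congr 1
            rw [range_foldl_gfib]
            show (gfib m b b).2 = b * (gfib (m + 1) 1 1).1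
            have h1 : (gfib (m + 1) 1 1).1 = (gfib m 1 1).2 := by
              show (gfib m 1 (1 + 1)).1 = (gfib m 1 1).2
              exact gfib_shift m 1 1
            rw [h1]
            have := gfib_linear m b 1 1
            rw [show b * 1 = b by ring] at this
            rw [this]
          · conv_lhs => rw [hsplit]
            rw [specA_run_other c hnu m b, ih _ hrestlen _ _ _ hrestmis]
            simp only [hnu, ite_false]

-- ===== VERDICT (by name: the statement is the Claim_ definition above) =====
theorem solution_spec : Claim_equal_solution := by
  intro message _
  unfold Spec_solution solution solution_alt
  have h0 : ([1, 1] : List Int) = [] ++ [1, 1] := rfl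
  rw [h0, foldA_spec message.toList [] 1 1 none]
  exact specA_eq_go message.toList.length message.toList le_rfl none 1 1
    (by intro c _ h; simp at h)
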